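-- pv_equiv track=rewrite | github.com/7anan5anom/albleu | albleu.py | generate_feature_ngrams
-- ===== SOURCE A (Python) =====
-- def generate_feature_ngrams(words,n,dict):
--     length = len(words)
--     array = {}
--     #check for stem existence
--     for i in range(length-n+1):
--         templist = words[i:i+n]
--         ngram = []
--         for t in templist:
--             if t in dict.keys():
--                 if len(dict[t]) > 0:
--                     ngram.append(dict[t][0])
--         if len(ngram)==n:
--             array[i] = (ngram,templist)
--     return array
-- ===== SOURCE B (Python) =====
-- def generate_feature_ngrams(words, n, dict):
--     length = len(words)
--     if n < 0:
--         return {}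
--     # map each word to its first dict value once (None if absent or empty)
--     first = [dict[w][0] if (w in dict and len(dict[w]) > 0) else None for w in words]
--     result = {}
--     # sliding count of unmapped words in the current window
--     bad = sum(1 for x in first[:n] if x is None)
--     for i in range(length - n + 1):
--         if i > 0:
--             if first[i - 1] is None:
--                 bad -= 1
--             if first[i + n - 1] is None:
--                 bad += 1
--         if bad == 0:
--             result[i] = (first[i:i + n], words[i:i + n])
--     return result
-- ===== Notes on version B (the rewrite author's own statement) =====
-- stated objective: faster
-- what changed: B computes each word's first dict value once and slides a running count of unmapped words across the windows, building output slices only for valid windows, instead of A's fresh dict lookups over every n-word window.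
import Mathlib
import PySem

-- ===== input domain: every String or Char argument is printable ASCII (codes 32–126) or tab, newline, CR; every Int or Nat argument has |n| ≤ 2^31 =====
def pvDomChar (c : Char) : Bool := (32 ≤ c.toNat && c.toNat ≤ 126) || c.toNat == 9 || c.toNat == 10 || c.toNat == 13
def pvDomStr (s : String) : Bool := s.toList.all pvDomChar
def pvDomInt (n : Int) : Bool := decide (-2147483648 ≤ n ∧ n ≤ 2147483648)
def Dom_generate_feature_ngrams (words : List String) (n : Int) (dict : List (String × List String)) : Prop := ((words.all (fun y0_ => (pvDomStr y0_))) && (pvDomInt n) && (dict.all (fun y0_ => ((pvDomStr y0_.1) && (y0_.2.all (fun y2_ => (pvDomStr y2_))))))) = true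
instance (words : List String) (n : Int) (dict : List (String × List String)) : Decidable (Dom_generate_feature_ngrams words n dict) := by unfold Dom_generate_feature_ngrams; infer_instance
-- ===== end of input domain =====

-- B replaces A's per-window dict lookups by a once-computed per-word mapping plus a
-- sliding count of unmapped words in the current window; return value only.

-- ===== PORT A =====
-- The loop keys i are strictly increasing, so each dict assignment array[i] = … adds a
-- fresh key: the dict is built by appending. v.headI is v[0], exact under the guard
-- 0 < v.length. 't in dict.keys()' / 'dict[t]' is first-match lookup on the assoc list.
def generate_feature_ngrams (words : List String) (n : Int) (dict : List (String × List String)) : List (Int × List String × List String) :=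
  let length : Int := (words.length : Int)
  (PySem.List.pyRange 0 (length - n + 1) 1).foldl
    (fun array i =>
      let templist := PySem.List.slice words (some i) (some (i + n))
      let ngram : List String := templist.foldl
        (fun ngram t =>
          match List.lookup t dict with
          | some v => if 0 < v.length then ngram ++ [v.headI] else ngram
          | none => ngram) []
      if (ngram.length : Int) = n then array ++ [(i, (ngram, templist))] else array)
    []

-- ===== PORT B =====
-- the per-word mapping of B's comprehension: first value of the word's dict entry, None otherwise
def pvFwd (dict : List (String × List String)) (w : String) : Option String :=
  match List.lookup w dict with
  | some v => if 0 < v.length then some v.headI else none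
  | none => none

-- result keys i are strictly increasing, so result[i] = … appends. When bad = 0 every
-- element of first[i:i+n] is a string (not None); .reduceOption extracts exactly them.
def generate_feature_ngrams_alt (words : List String) (n : Int) (dict : List (String × List String)) : List (Int × List String × List String) :=
  let length : Int := (words.length : Int)
  if n < 0 then []
  else
    let first : List (Option String) := words.map (pvFwd dict)
    let bad0 : Int := ((PySem.List.slice first (some 0) (some n)).countP (fun x => x.isNone) : Int)
    ((PySem.List.pyRange 0 (length - n + 1) 1).foldl
      (fun (s : Int × List (Int × List String × List String)) i =>
        let bad : Int :=
          if 0 < i then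
            let b1 : Int := if (PySem.List.pyGetD first (i - 1) none).isNone then s.1 - 1 else s.1
            if (PySem.List.pyGetD first (i + n - 1) none).isNone then b1 + 1 else b1
          else s.1
        if bad = 0 then
          (bad, s.2 ++ [(i, ((PySem.List.slice first (some i) (some (i + n))).reduceOption,
                             PySem.List.slice words (some i) (some (i + n))))])
        else (bad, s.2))
      (bad0, [])).2

-- ===== PRECONDITION & SPEC =====
def Spec_generate_feature_ngrams (words : List String) (n : Int) (dict : List (String × List String)) (out : List (Int × List String × List String)) : Prop := out = generate_feature_ngrams_alt words n dict
instance (words : List String) (n : Int) (dict : List (String × List String)) (out : List (Int × List String × List String)) : Decidable (Spec_generate_feature_ngrams words n dict out) := by unfold Spec_generate_feature_ngrams; infer_instance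

-- ===== CLAIM (what is proved, stated in full; the proofs are below) =====
def Claim_equal_generate_feature_ngrams : Prop := ∀ (words : List String) (n : Int) (dict : List (String × List String)), Dom_generate_feature_ngrams words n dict → Spec_generate_feature_ngrams words n dict (generate_feature_ngrams words n dict)

-- ===== LEMMAS AND PROOFS =====

-- the None count of the window of length N starting at k
def pvCnt (first : List (Option String)) (N k : Nat) : Nat :=
  ((first.drop k).take N).countP (fun x => x.isNone)

-- range(0, M) for an arbitrary Int bound M (empty when M ≤ 0)
theorem pvRange_int (M : Int) :
    PySem.List.pyRange 0 M 1 = (List.range M.toNat).map (fun (k : Nat) => (k : Int)) := by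
  simp only [PySem.List.pyRange]
  norm_num
  split_ifs with h
  · rfl
  · have : M.toNat = 0 := by omega
    simp [this]

-- A's inner loop is the filterMap of the per-word mapping
theorem pvInner (dict : List (String × List String)) (l : List String) (acc : List String) :
    l.foldl
      (fun ngram t =>
        match List.lookup t dict with
        | some v => if 0 < v.length then ngram ++ [v.headI] else ngram
        | none => ngram) acc = acc ++ l.filterMap (pvFwd dict) := by
  induction l generalizing acc with
  | nil => simp
  | cons t l ih =>
    simp only [List.foldl_cons, List.filterMap_cons]
    cases h : List.lookup t dict with
    | none => simp [ih, pvFwd, h]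
    | some v => by_cases hv : 0 < v.length <;> simp [ih, pvFwd, h, hv]

theorem pvLen1 (w : List (Option String)) : w.reduceOption.length = w.countP (fun x => x.isSome) := by
  induction w with
  | nil => rfl
  | cons x t ih => cases x <;> simp [List.reduceOption_cons_of_some, ih]

theorem pvLen2 (w : List (Option String)) : w.countP (fun x => x.isSome) + w.countP (fun x => x.isNone) = w.length := by
  induction w with
  | nil => rfl
  | cons x t ih => cases x <;> simp only [List.countP_cons, List.length_cons] <;> simp <;> omega

-- a full window maps completely iff its None count is zero
theorem pvCond (w : List (Option String)) (N : Nat) (hw : w.length = N) :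
    ((w.reduceOption.length : Int) = (N : Int)) ↔ w.countP (fun x => x.isNone) = 0 := by
  have h1 := pvLen1 w
  have h2 := pvLen2 w
  rw [h1]
  constructor
  · intro h; omega
  · intro h; omega

-- sliding-count step: dropping index m-1 and adding index m+N-1 moves the None count one window right
theorem pvStep (xs : List (Option String)) (N m : Nat) (hm : 1 ≤ m) (hL : m + N ≤ xs.length) :
    (((xs.drop (m - 1)).take N).countP (fun x => x.isNone) : Int)
      - (if (xs.getD (m - 1) none).isNone then 1 else 0)
      + (if (xs.getD (m + N - 1) none).isNone then 1 else 0)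
    = (((xs.drop m).take N).countP (fun x => x.isNone) : Int) := by
  cases N with
  | zero =>
    simp only [List.take_zero, List.countP_nil]
    have e : m + 0 - 1 = m - 1 := by omega
    rw [e]
    split_ifs <;> simp
  | succ N' =>
    have h1 : m - 1 < xs.length := by omega
    have h2 : m + N' < xs.length := by omega
    have e : m - 1 + 1 = m := by omega
    have hd : xs.drop (m - 1) = xs[m - 1] :: xs.drop m := by
      rw [List.drop_eq_getElem_cons h1, e]
    have ht : (xs.drop m).take (N' + 1) = (xs.drop m).take N' ++ [xs[m + N']] := by
      rw [List.take_add_one]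
      congr 1
      rw [List.getElem?_drop]
      simp [List.getElem?_eq_getElem h2]
    have hg1 : xs.getD (m - 1) none = xs[m - 1] := by
      rw [List.getD_eq_getElem?_getD, List.getElem?_eq_getElem h1]; rfl
    have hg2 : xs.getD (m + (N' + 1) - 1) none = xs[m + N'] := by
      have e2 : m + (N' + 1) - 1 = m + N' := by omega
      rw [e2, List.getD_eq_getElem?_getD, List.getElem?_eq_getElem h2]; rfl
    rw [hd, ht, hg1, hg2]
    simp only [List.take_succ_cons, List.countP_cons, List.countP_append, List.countP_nil]
    split_ifs <;> push_cast <;> simp_all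

-- the main invariant: after m iterations B's state is (None count of window m-1, A's dict so far)
theorem pvMain (words : List String) (dict : List (String × List String)) (N : Nat) (m : Nat)
    (h : ∀ k, k < m → k + N ≤ words.length) :
    ((List.range m).map (fun (k : Nat) => (k : Int))).foldl
      (fun (s : Int × List (Int × List String × List String)) i =>
        let bad : Int :=
          if 0 < i then
            let b1 : Int := if (PySem.List.pyGetD (words.map (pvFwd dict)) (i - 1) none).isNone then s.1 - 1 else s.1
            if (PySem.List.pyGetD (words.map (pvFwd dict)) (i + (N : Int) - 1) none).isNone then b1 + 1 else b1
          else s.1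
        if bad = 0 then
          (bad, s.2 ++ [(i, ((PySem.List.slice (words.map (pvFwd dict)) (some i) (some (i + (N : Int)))).reduceOption,
                             PySem.List.slice words (some i) (some (i + (N : Int)))))])
        else (bad, s.2))
      ((pvCnt (words.map (pvFwd dict)) N 0 : Int), []) =
    ((pvCnt (words.map (pvFwd dict)) N (m - 1) : Int),
      ((List.range m).map (fun (k : Nat) => (k : Int))).foldl
        (fun array i =>
          let templist := PySem.List.slice words (some i) (some (i + (N : Int)))
          let ngram : List String := templist.foldl
            (fun ngram t =>
              match List.lookup t dict with
              | some v => if 0 < v.length then ngram ++ [v.headI] else ngram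
              | none => ngram) []
          if (ngram.length : Int) = (N : Int) then array ++ [(i, (ngram, templist))] else array)
        []) := by
  induction m with
  | zero => simp
  | succ m ih =>
    have hm : m + N ≤ words.length := h m (Nat.lt_succ_self m)
    have ih' := ih (fun k hk => h k (Nat.lt_succ_of_lt hk))
    rw [List.range_succ, List.map_append, List.foldl_append, List.foldl_append, ih']
    simp only [List.map_cons, List.map_nil, List.foldl_cons, List.foldl_nil]
    set first := words.map (pvFwd dict) with hfirst
    have hflen : first.length = words.length := by simp [hfirst]
    have hslicew : PySem.List.slice words (some (m : Int)) (some ((m : Int) + (N : Int))) = (words.drop m).take N :=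
      PySem.List.slice_natCast_add words m N
    have hslicef : PySem.List.slice first (some (m : Int)) (some ((m : Int) + (N : Int))) = (first.drop m).take N :=
      PySem.List.slice_natCast_add first m N
    have hmapwin : (first.drop m).take N = ((words.drop m).take N).map (pvFwd dict) := by
      rw [hfirst, List.map_take, List.map_drop]
    have hwinlen : ((first.drop m).take N).length = N := by
      simp [hflen]; omega
    have hng : ((words.drop m).take N).foldl
        (fun ngram t =>
          match List.lookup t dict with
          | some v => if 0 < v.length then ngram ++ [v.headI] else ngram
          | none => ngram) [] = ((first.drop m).take N).reduceOption := by
      rw [pvInner, hmapwin]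
      simp [List.reduceOption, List.filterMap_map]
    have hbad : (if 0 < (m : Int) then
          let b1 : Int := if (PySem.List.pyGetD first ((m : Int) - 1) none).isNone then (pvCnt first N (m - 1) : Int) - 1 else (pvCnt first N (m - 1) : Int)
          if (PySem.List.pyGetD first ((m : Int) + (N : Int) - 1) none).isNone then b1 + 1 else b1
        else (pvCnt first N (m - 1) : Int)) = (pvCnt first N m : Int) := by
      by_cases hm0 : 0 < m
      · rw [if_pos (by exact_mod_cast hm0)]
        have e1 : (m : Int) - 1 = ((m - 1 : Nat) : Int) := by omega
        have e2 : (m : Int) + (N : Int) - 1 = ((m + N - 1 : Nat) : Int) := by omega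
        rw [e1, e2, PySem.List.pyGetD_natCast, PySem.List.pyGetD_natCast]
        have hstep := pvStep first N m hm0 (by omega)
        simp only [pvCnt] at hstep ⊢
        split_ifs at hstep ⊢ <;> omega
      · have hm0' : m = 0 := by omega
        subst hm0'
        rw [if_neg (by simp)]
    rw [hbad]
    have hcond : (((((first.drop m).take N).reduceOption).length : Int) = (N : Int)) ↔ pvCnt first N m = 0 := by
      simpa [pvCnt] using pvCond ((first.drop m).take N) N hwinlen
    by_cases hz : pvCnt first N m = 0
    · rw [if_pos (show ((pvCnt first N m : Int) = (0 : Int)) by exact_mod_cast hz)]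
      rw [hslicew, hslicef, hng]
      rw [if_pos (hcond.mpr hz)]
      simp
    · rw [if_neg (show ¬((pvCnt first N m : Int) = (0 : Int)) by exact_mod_cast hz)]
      rw [hslicew, hng]
      rw [if_neg (fun hc => hz (hcond.mp hc))]
      simp

-- ===== VERDICT (by name: the statement is the Claim_ definition above) =====
theorem generate_feature_ngrams_spec : Claim_equal_generate_feature_ngrams := by
  intro words n dict _
  unfold Spec_generate_feature_ngrams
  by_cases hn : n < 0
  · simp only [generate_feature_ngrams_alt, if_pos hn]
    simp only [generate_feature_ngrams]
    refine (PySem.List.foldl_congr_mem _ _ (fun (a : List (Int × List String × List String)) (_ : Int) => a) _ ?_).trans (PySem.List.foldl_ignore _ _)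
    intro acc i _
    dsimp only
    rw [if_neg]
    intro heq
    have := Int.natCast_nonneg (((PySem.List.slice words (some i) (some (i + n))).foldl
      (fun ngram t =>
        match List.lookup t dict with
        | some v => if 0 < v.length then ngram ++ [v.headI] else ngram
        | none => ngram) []).length)
    omega
  · rw [Int.not_lt] at hn
    obtain ⟨N, rfl⟩ := Int.eq_ofNat_of_zero_le hn
    simp only [generate_feature_ngrams, generate_feature_ngrams_alt]
    rw [if_neg (by omega : ¬((N : Int) < 0))]
    rw [pvRange_int]
    have hb : ((PySem.List.slice (words.map (pvFwd dict)) (some 0) (some (N : Int))).countP (fun x => x.isNone) : Int)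
        = (pvCnt (words.map (pvFwd dict)) N 0 : Int) := by
      have h0 : PySem.List.slice (words.map (pvFwd dict)) (some (0 : Int)) (some (N : Int))
          = ((words.map (pvFwd dict)).drop 0).take N := by
        simpa using PySem.List.slice_natCast_add (words.map (pvFwd dict)) 0 N
      rw [h0, pvCnt]
    rw [hb, pvMain words dict N ((words.length : Int) - (N : Int) + 1).toNat (fun k hk => by omega)]
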